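-- pv_equiv track=rewrite | github.com/Ryuki-SS/LeetCode | exam/findMaxButtons.py | findMaxButtons
-- ===== SOURCE A (Python) =====
-- def findMaxButtons(buttons):
--     res = 0
--     for i in range(len(buttons)):
--         for j in range(buttons[i]):
--             if j == 0:
--                 res += 1
--             else:
--                 res += i + 1
--     return res
-- ===== SOURCE B (Python) =====
-- def findMaxButtons(buttons):
--     # closed form per element: a positive b at index i contributes 1 + (b-1)*(i+1)
--     return sum(1 + (b - 1) * (i + 1) for i, b in enumerate(buttons) if b > 0)
-- ===== Notes on version B (the rewrite author's own statement) =====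
-- stated objective: faster
-- what changed: Replaced the inner per-button loop (one iteration per unit of buttons[i]) with a closed-form contribution 1+(b-1)*(i+1) summed in a single pass over enumerate(buttons).
import Mathlib
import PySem

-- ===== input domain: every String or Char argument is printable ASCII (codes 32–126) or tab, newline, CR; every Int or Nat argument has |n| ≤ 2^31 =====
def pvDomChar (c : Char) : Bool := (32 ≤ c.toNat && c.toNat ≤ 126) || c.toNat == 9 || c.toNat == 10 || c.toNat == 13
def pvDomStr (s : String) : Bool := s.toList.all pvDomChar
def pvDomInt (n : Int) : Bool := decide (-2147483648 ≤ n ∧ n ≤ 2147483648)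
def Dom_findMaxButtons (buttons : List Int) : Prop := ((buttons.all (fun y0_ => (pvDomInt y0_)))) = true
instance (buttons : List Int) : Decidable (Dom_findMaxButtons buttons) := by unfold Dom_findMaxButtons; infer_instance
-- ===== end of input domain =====

-- B replaces A's inner per-unit loop by a closed-form contribution per element (one pass, asymptotically faster).


-- ===== PORT A =====
def findMaxButtons (buttons : List Int) : Int :=
  (PySem.List.pyRange 0 buttons.length 1).foldl (fun res i =>
    (PySem.List.pyRange 0 (PySem.List.pyGetD buttons i 0) 1).foldl (fun r j =>
      if j == 0 then r + 1 else r + (i + 1)) res) 0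

-- ===== PORT B =====
def findMaxButtons_alt (buttons : List Int) : Int :=
  (PySem.List.enumerate buttons 0).foldl (fun acc p =>
    if p.2 > 0 then acc + (1 + (p.2 - 1) * (p.1 + 1)) else acc) 0

-- ===== PRECONDITION & SPEC =====
def Spec_findMaxButtons (buttons : List Int) (out : Int) : Prop := out = findMaxButtons_alt buttons
instance (buttons : List Int) (out : Int) : Decidable (Spec_findMaxButtons buttons out) := by unfold Spec_findMaxButtons; infer_instance

-- ===== CLAIM (what is proved, stated in full; the proofs are below) =====
def Claim_equal_findMaxButtons : Prop := ∀ (buttons : List Int), Dom_findMaxButtons buttons → Spec_findMaxButtons buttons (findMaxButtons buttons)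

-- ===== LEMMAS AND PROOFS =====

-- inner loop of A over range(b): closed form
theorem inner_range_foldl (i : Int) (n : Nat) (res : Int) :
    List.foldl (fun (r : Int) (k : Nat) => if ((k : Int) == 0) then r + 1 else r + (i + 1)) res (List.range n)
      = res + (if 0 < n then 1 + ((n : Int) - 1) * (i + 1) else 0) := by
  induction n generalizing res with
  | zero => simp
  | succ m ih =>
    rw [List.range_succ, List.foldl_append, ih]
    cases m with
    | zero => simp
    | succ m' =>
      simp only [List.foldl_cons, List.foldl_nil]
      have h : ¬ (((m' + 1 : Nat) : Int) == 0) = true := by simp; omega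
      simp only [h, if_pos (Nat.succ_pos _)]
      push_cast
      ring

theorem inner_loop_closed (i b res : Int) :
    (PySem.List.pyRange 0 b 1).foldl (fun r j => if j == 0 then r + 1 else r + (i + 1)) res
      = res + (if 0 < b then 1 + (b - 1) * (i + 1) else 0) := by
  rw [PySem.List.pyRange_one]
  simp only [List.foldl_map, zero_add, sub_zero]
  rw [inner_range_foldl]
  rcases (le_or_gt b 0) with hb | hb
  · have h1 : b.toNat = 0 := Int.toNat_of_nonpos hb
    simp [h1, not_lt.mpr hb]
  · have h1 : 0 < b.toNat := by omega
    have h2 : ((b.toNat : Int)) = b := Int.toNat_of_nonneg hb.le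
    simp [h1, hb, h2]

-- ===== VERDICT (by name: the statement is the Claim_ definition above) =====
theorem findMaxButtons_spec : Claim_equal_findMaxButtons := by
  intro buttons _
  unfold Spec_findMaxButtons findMaxButtons findMaxButtons_alt
  rw [PySem.List.enumerate_eq_map_pyRange (d := 0), List.foldl_map]
  apply PySem.List.foldl_congr_mem
  intro acc j hj
  rw [PySem.List.mem_pyRange_one] at hj
  rw [inner_loop_closed]
  by_cases hb : 0 < PySem.List.pyGetD buttons j 0
  · simp [hb]
  · simp [hb]
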